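-- pv_equiv track=rewrite | github.com/itnoobzzy/auto_test_platform | apps/operate_data_manage/serializers.py | _get_opreate_param_value
-- ===== SOURCE A (Python) =====
-- def _get_opreate_param_value(operate_data):
--     """获取测试能力信息"""
--     data_info = {}
--     data_info['test_case_count'] = 0
--     data_info['whole_test_times'] = 0
--     data_info['test_case_execute_times'] = 0
--     data_info['api_call_times'] = 0
--     data_info['business_landing_times'] = 0
--     for data in operate_data:
--         sub_index = data['operative_sub_index']
--         if sub_index == '测试用例数':
--             data_info['test_case_count'] += int(data['operate_data'])
--         elif sub_index == '自动化测试次数':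
--             data_info['whole_test_times'] += int(data['operate_data'])
--         elif sub_index == '测试用例执行次数':
--             data_info['test_case_execute_times'] += int(data['operate_data'])
--         elif sub_index == '接口能力调用次数':
--             data_info['api_call_times'] += int(data['operate_data'])
--             data_info['business_landing_times'] += 1
--
--     return data_info
-- ===== SOURCE B (Python) =====
-- from collections import defaultdict
--
-- _GROUP_KEYS = ('测试用例数', '自动化测试次数', '测试用例执行次数', '接口能力调用次数')
--
-- def _get_opreate_param_value(operate_data):
--     """获取测试能力信息 — group values by sub-index first, then aggregate each group."""
--     groups = defaultdict(list)
--     for data in operate_data: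
--         k = data['operative_sub_index']
--         if k in _GROUP_KEYS:
--             groups[k].append(data['operate_data'])
--     return {
--         'test_case_count': sum(int(v) for v in groups['测试用例数']),
--         'whole_test_times': sum(int(v) for v in groups['自动化测试次数']),
--         'test_case_execute_times': sum(int(v) for v in groups['测试用例执行次数']),
--         'api_call_times': sum(int(v) for v in groups['接口能力调用次数']),
--         'business_landing_times': len(groups['接口能力调用次数']),
--     }
-- ===== Notes on version B (the rewrite author's own statement) =====
-- stated objective: alternative
-- what changed: Replaces the interleaved if/elif counter updates with a two-pass shape: group the operate_data values by sub-index category into a defaultdict(list) first, then aggregate each of the five fields (sums / a length) from its group.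
import Mathlib
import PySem

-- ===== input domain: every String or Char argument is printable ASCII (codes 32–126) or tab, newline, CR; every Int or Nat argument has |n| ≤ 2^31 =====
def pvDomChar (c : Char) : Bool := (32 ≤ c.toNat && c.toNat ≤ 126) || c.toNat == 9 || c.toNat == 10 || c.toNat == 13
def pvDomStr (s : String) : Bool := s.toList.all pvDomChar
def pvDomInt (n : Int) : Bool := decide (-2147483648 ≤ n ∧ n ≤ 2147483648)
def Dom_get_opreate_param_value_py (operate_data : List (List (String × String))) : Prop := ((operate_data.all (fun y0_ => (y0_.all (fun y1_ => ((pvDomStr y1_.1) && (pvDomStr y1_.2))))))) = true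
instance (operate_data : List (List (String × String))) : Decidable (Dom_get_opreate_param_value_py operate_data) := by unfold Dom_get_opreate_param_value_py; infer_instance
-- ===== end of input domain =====

-- B groups the operate_data values by sub-index first and then aggregates each of the five
-- fields from its group; A updates the five counters in one interleaved if/elif loop.

-- data['operative_sub_index'] (first-match assoc lookup; Pre_ guarantees the key exists)
def pvSub (data : List (String × String)) : String :=
  (List.lookup "operative_sub_index" data).getD ""

-- int(data['operate_data']) (Pre_ guarantees the key exists and the value parses)
def pvVal (data : List (String × String)) : Int :=
  (PySem.Int.ofStr? ((List.lookup "operate_data" data).getD "")).getD 0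

-- ===== PORT A =====
def aStep (di : PySem.Dict String Int) (data : List (String × String)) : PySem.Dict String Int :=
  if pvSub data = "测试用例数" then
    di.modify "test_case_count" 0 (· + pvVal data)
  else if pvSub data = "自动化测试次数" then
    di.modify "whole_test_times" 0 (· + pvVal data)
  else if pvSub data = "测试用例执行次数" then
    di.modify "test_case_execute_times" 0 (· + pvVal data)
  else if pvSub data = "接口能力调用次数" then
    (di.modify "api_call_times" 0 (· + pvVal data)).modify "business_landing_times" 0 (· + 1)
  else di

def get_opreate_param_value_py (operate_data : List (List (String × String))) : List (String × Int) :=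
  let data_info : PySem.Dict String Int :=
    (((((PySem.Dict.empty).insert "test_case_count" 0).insert "whole_test_times" 0).insert
        "test_case_execute_times" 0).insert "api_call_times" 0).insert "business_landing_times" 0
  (operate_data.foldl aStep data_info).items

-- ===== PORT B =====
def pvGroupKeys : List String := ["测试用例数", "自动化测试次数", "测试用例执行次数", "接口能力调用次数"]

-- groups[k].append(data['operate_data']) for known categories (defaultdict(list))
def bStep (g : PySem.Dict String (List String)) (data : List (String × String)) :
    PySem.Dict String (List String) :=
  if pvSub data ∈ pvGroupKeys then
    g.modify (pvSub data) [] (· ++ [(List.lookup "operate_data" data).getD ""])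
  else g

-- sum(int(v) for v in vs)
def pvSumInt (vs : List String) : Int :=
  (vs.map (fun v => (PySem.Int.ofStr? v).getD 0)).sum

def get_opreate_param_value_py_alt (operate_data : List (List (String × String))) : List (String × Int) :=
  let groups := operate_data.foldl bStep PySem.Dict.empty
  [("test_case_count", pvSumInt (groups.getD "测试用例数" [])),
   ("whole_test_times", pvSumInt (groups.getD "自动化测试次数" [])),
   ("test_case_execute_times", pvSumInt (groups.getD "测试用例执行次数" [])),
   ("api_call_times", pvSumInt (groups.getD "接口能力调用次数" [])),
   ("business_landing_times", ((groups.getD "接口能力调用次数" []).length : Int))]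

-- ===== PRECONDITION & SPEC =====
-- Pre_ excludes exactly the inputs on which A raises: a missing 'operative_sub_index' key
-- (KeyError), and, for entries of the four known categories, a missing 'operate_data' key
-- (KeyError) or a value int() rejects (ValueError).
def Pre_get_opreate_param_value_py (operate_data : List (List (String × String))) : Prop :=
  ∀ data ∈ operate_data,
    (List.lookup "operative_sub_index" data).isSome = true ∧
    ((List.lookup "operative_sub_index" data).getD "" ∈
        ["测试用例数", "自动化测试次数", "测试用例执行次数", "接口能力调用次数"] →
      (List.lookup "operate_data" data).isSome = true ∧
      (PySem.Int.ofStr? ((List.lookup "operate_data" data).getD "")).isSome = true)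

instance (operate_data : List (List (String × String))) : Decidable (Pre_get_opreate_param_value_py operate_data) := by
  unfold Pre_get_opreate_param_value_py; infer_instance

def pvWitness_get_opreate_param_value_py : (List (List (String × String))) :=
  [[("operative_sub_index", "cases"), ("operate_data", "7")]]

def Spec_get_opreate_param_value_py (operate_data : List (List (String × String))) (out : List (String × Int)) : Prop := out = get_opreate_param_value_py_alt operate_data
instance (operate_data : List (List (String × String))) (out : List (String × Int)) : Decidable (Spec_get_opreate_param_value_py operate_data out) := by unfold Spec_get_opreate_param_value_py; infer_instance

-- ===== CLAIM (what is proved, stated in full; the proofs are below) =====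
def Claim_equal_get_opreate_param_value_py : Prop := ∀ (operate_data : List (List (String × String))), Dom_get_opreate_param_value_py operate_data → Pre_get_opreate_param_value_py operate_data → Spec_get_opreate_param_value_py operate_data (get_opreate_param_value_py operate_data)

-- ===== LEMMAS AND PROOFS =====

-- the five-field state of A's loop, written as an explicit dict literal
def mkD (a b c d e : Int) : PySem.Dict String Int :=
  PySem.Dict.mk [("test_case_count", a), ("whole_test_times", b), ("test_case_execute_times", c),
                 ("api_call_times", d), ("business_landing_times", e)]

-- total contribution of category c to its sum field
def sumCat (c : String) (l : List (List (String × String))) : Int :=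
  ((l.filter (fun d => pvSub d == c)).map pvVal).sum

theorem mkD_modify1 (a b c d e : Int) (f : Int → Int) :
    (mkD a b c d e).modify "test_case_count" 0 f = mkD (f a) b c d e := rfl
theorem mkD_modify2 (a b c d e : Int) (f : Int → Int) :
    (mkD a b c d e).modify "whole_test_times" 0 f = mkD a (f b) c d e := rfl
theorem mkD_modify3 (a b c d e : Int) (f : Int → Int) :
    (mkD a b c d e).modify "test_case_execute_times" 0 f = mkD a b (f c) d e := rfl
theorem mkD_modify4 (a b c d e : Int) (f : Int → Int) :
    (mkD a b c d e).modify "api_call_times" 0 f = mkD a b c (f d) e := rfl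
theorem mkD_modify5 (a b c d e : Int) (f : Int → Int) :
    (mkD a b c d e).modify "business_landing_times" 0 f = mkD a b c d (f e) := rfl

theorem sumCat_cons_self {x : List (String × String)} {c : String}
    (h : pvSub x = c) (l : List (List (String × String))) :
    sumCat c (x :: l) = pvVal x + sumCat c l := by
  simp [sumCat, h]

theorem sumCat_cons_ne {x : List (String × String)} {c : String}
    (h : ¬ pvSub x = c) (l : List (List (String × String))) :
    sumCat c (x :: l) = sumCat c l := by
  simp [sumCat, h]

theorem foldA_eq (l : List (List (String × String))) :
    ∀ (a b c d e : Int), l.foldl aStep (mkD a b c d e) =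
      mkD (a + sumCat "测试用例数" l) (b + sumCat "自动化测试次数" l)
          (c + sumCat "测试用例执行次数" l) (d + sumCat "接口能力调用次数" l)
          (e + (l.countP (fun x => pvSub x == "接口能力调用次数") : Int)) := by
  induction l with
  | nil => intro a b c d e; simp [sumCat]
  | cons x rest ih =>
    intro a b c d e
    simp only [List.foldl_cons, List.countP_cons]
    by_cases h1 : pvSub x = "测试用例数"
    · have n2 : ¬ pvSub x = "自动化测试次数" := by rw [h1]; decide
      have n3 : ¬ pvSub x = "测试用例执行次数" := by rw [h1]; decide
      have n4 : ¬ pvSub x = "接口能力调用次数" := by rw [h1]; decide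
      rw [show aStep (mkD a b c d e) x = mkD (a + pvVal x) b c d e from by
            simp [aStep, h1, mkD_modify1], ih,
          sumCat_cons_self h1, sumCat_cons_ne n2, sumCat_cons_ne n3, sumCat_cons_ne n4]
      simp only [mkD, PySem.Dict.mk.injEq, List.cons.injEq, Prod.mk.injEq, and_true, true_and,
                 beq_iff_eq, n4, if_false]
      push_cast; omega
    · by_cases h2 : pvSub x = "自动化测试次数"
      · have n3 : ¬ pvSub x = "测试用例执行次数" := by rw [h2]; decide
        have n4 : ¬ pvSub x = "接口能力调用次数" := by rw [h2]; decide
        rw [show aStep (mkD a b c d e) x = mkD a (b + pvVal x) c d e from by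
              simp [aStep, h2, mkD_modify2], ih,
            sumCat_cons_ne h1, sumCat_cons_self h2, sumCat_cons_ne n3, sumCat_cons_ne n4]
        simp only [mkD, PySem.Dict.mk.injEq, List.cons.injEq, Prod.mk.injEq, and_true, true_and,
                   beq_iff_eq, n4, if_false]
        push_cast; omega
      · by_cases h3 : pvSub x = "测试用例执行次数"
        · have n4 : ¬ pvSub x = "接口能力调用次数" := by rw [h3]; decide
          rw [show aStep (mkD a b c d e) x = mkD a b (c + pvVal x) d e from by
                simp [aStep, h3, mkD_modify3], ih,
              sumCat_cons_ne h1, sumCat_cons_ne h2, sumCat_cons_self h3, sumCat_cons_ne n4]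
          simp only [mkD, PySem.Dict.mk.injEq, List.cons.injEq, Prod.mk.injEq, and_true, true_and,
                     beq_iff_eq, n4, if_false]
          push_cast; omega
        · by_cases h4 : pvSub x = "接口能力调用次数"
          · rw [show aStep (mkD a b c d e) x = mkD a b c (d + pvVal x) (e + 1) from by
                  simp [aStep, h4, mkD_modify4, mkD_modify5], ih,
                sumCat_cons_ne h1, sumCat_cons_ne h2, sumCat_cons_ne h3, sumCat_cons_self h4]
            simp only [mkD, PySem.Dict.mk.injEq, List.cons.injEq, Prod.mk.injEq, and_true, true_and,
                       beq_iff_eq, h4, if_true]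
            push_cast; omega
          · rw [show aStep (mkD a b c d e) x = mkD a b c d e from by
                  simp [aStep, h1, h2, h3, h4], ih,
                sumCat_cons_ne h1, sumCat_cons_ne h2, sumCat_cons_ne h3, sumCat_cons_ne h4]
            simp only [mkD, PySem.Dict.mk.injEq, List.cons.injEq, Prod.mk.injEq, and_true, true_and,
                       beq_iff_eq, h4, if_false]
            push_cast; omega

theorem foldB_getD (l : List (List (String × String))) :
    ∀ (g : PySem.Dict String (List String)) (c : String), c ∈ pvGroupKeys →
      (l.foldl bStep g).getD c [] =
        g.getD c [] ++ (l.filter (fun d => pvSub d == c)).map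
          (fun d => (List.lookup "operate_data" d).getD "") := by
  induction l with
  | nil => intro g c _; simp
  | cons x rest ih =>
    intro g c hc
    simp only [List.foldl_cons, List.filter_cons]
    by_cases hk : pvSub x ∈ pvGroupKeys
    · simp only [bStep, if_pos hk]
      rw [ih _ c hc, PySem.Dict.getD_modify]
      by_cases hxc : c = pvSub x
      · subst hxc
        simp [List.append_assoc]
      · have hb : (pvSub x == c) = false := by
          simpa [beq_eq_false_iff_ne] using fun h => hxc h.symm
        simp [hxc, hb]
    · simp only [bStep, if_neg hk]
      rw [ih _ c hc]
      have hb : (pvSub x == c) = false := by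
        simpa [beq_eq_false_iff_ne] using fun h => hk (by rw [h]; exact hc)
      simp [hb]

-- ===== VERDICT (by name: the statement is the Claim_ definition above) =====
theorem get_opreate_param_value_py_spec : Claim_equal_get_opreate_param_value_py := by
  intro operate_data _ _
  unfold Spec_get_opreate_param_value_py
  show (operate_data.foldl aStep (mkD 0 0 0 0 0)).items = _
  rw [foldA_eq]
  unfold get_opreate_param_value_py_alt
  have h1 := foldB_getD operate_data PySem.Dict.empty "测试用例数" (by simp [pvGroupKeys])
  have h2 := foldB_getD operate_data PySem.Dict.empty "自动化测试次数" (by simp [pvGroupKeys])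
  have h3 := foldB_getD operate_data PySem.Dict.empty "测试用例执行次数" (by simp [pvGroupKeys])
  have h4 := foldB_getD operate_data PySem.Dict.empty "接口能力调用次数" (by simp [pvGroupKeys])
  simp only [h1, h2, h3, h4, PySem.Dict.getD_empty, List.nil_append]
  simp [mkD, pvSumInt, sumCat, List.map_map, Function.comp_def,
        List.countP_eq_length_filter]
  exact ⟨rfl, rfl, rfl, rfl⟩
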